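-- pv_equiv track=rewrite | github.com/the-order-of-phoenix/edugen-backend | src/utils.py | find_nearest_subjects
-- ===== SOURCE A (Python) =====
-- def calculate_levenshtein_distance(phrase1, phrase2):
--     m = len(phrase1)
--     n = len(phrase2)
--
--     # Create a matrix to store the distances
--     distance = [[0] * (n + 1) for _ in range(m + 1)]
--
--     # Initialize the first row and column of the matrix
--     for i in range(m + 1):
--         distance[i][0] = i
--     for j in range(n + 1):
--         distance[0][j] = j
--
--     # Calculate the Levenshtein distance
--     for i in range(1, m + 1):
--         for j in range(1, n + 1):
--             if phrase1[i - 1] == phrase2[j - 1]: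
--                 cost = 0
--             else:
--                 cost = 1
--
--             distance[i][j] = min(
--                 distance[i - 1][j] + 1,  # Deletion
--                 distance[i][j - 1] + 1,  # Insertion
--                 distance[i - 1][j - 1] + cost  # Substitution
--             )
--
--     return distance[m][n]
--
-- def find_nearest_subjects(list_of_subjects , source_subject):
--     scores = {}
--     for sub in list_of_subjects:
--         lev_score = calculate_levenshtein_distance(sub , source_subject)
--         scores[sub] = lev_score
--     if len(scores) == 0:
--         return None
--     threshold = 4
--     min_value = min(scores , key=scores.get)
--     min_key = min_value
--     min_value = scores[min_key]
--
--     if threshold <= min_value: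
--         return min_key
--     return None
-- ===== SOURCE B (Python) =====
-- def _edit(p, q, i, j, cache):
--     # top-down memoized edit distance of p[:i] and q[:j]
--     key = (i, j)
--     if key in cache:
--         return cache[key]
--     if i == 0:
--         v = j
--     elif j == 0:
--         v = i
--     else:
--         cost = 0 if p[i - 1] == q[j - 1] else 1
--         v = min(_edit(p, q, i - 1, j, cache) + 1,
--                 _edit(p, q, i, j - 1, cache) + 1,
--                 _edit(p, q, i - 1, j - 1, cache) + cost)
--     cache[key] = v
--     return v
--
-- def _lev(a, b):
--     return _edit(a, b, len(a), len(b), {})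
--
-- def find_nearest_subjects(list_of_subjects, source_subject):
--     best = None
--     for sub in list_of_subjects:
--         d = _lev(sub, source_subject)
--         if best is None or d < best[0]:
--             best = (d, sub)
--     if best is None:
--         return None
--     d, sub = best
--     return sub if 4 <= d else None
-- ===== Notes on version B (the rewrite author's own statement) =====
-- stated objective: alternative
-- what changed: Levenshtein is computed by a top-down memoized recursion edit(i,j) over index pairs with a dict cache instead of filling a bottom-up (m+1)x(n+1) matrix with three loops, and the nearest subject is picked in one running-best pass (strict < so the first minimum wins) instead of building a score dict and calling min(scores, key=scores.get).
import Mathlib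
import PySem

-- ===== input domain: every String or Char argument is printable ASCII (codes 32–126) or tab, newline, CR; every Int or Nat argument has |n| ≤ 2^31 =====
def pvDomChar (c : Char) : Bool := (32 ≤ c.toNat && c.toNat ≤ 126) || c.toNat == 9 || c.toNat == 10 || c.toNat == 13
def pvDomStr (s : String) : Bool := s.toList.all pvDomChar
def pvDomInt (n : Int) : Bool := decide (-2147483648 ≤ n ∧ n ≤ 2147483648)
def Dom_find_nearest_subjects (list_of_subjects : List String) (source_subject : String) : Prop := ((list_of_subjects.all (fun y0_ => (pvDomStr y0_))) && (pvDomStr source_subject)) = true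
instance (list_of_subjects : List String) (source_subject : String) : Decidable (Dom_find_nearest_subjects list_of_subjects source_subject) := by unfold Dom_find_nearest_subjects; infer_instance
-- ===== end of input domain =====

-- B computes Levenshtein by a top-down memoized recursion over index pairs (dict cache)
-- instead of A's bottom-up full-matrix DP, and picks the nearest subject with a one-pass
-- running best (strict <) instead of A's score dict + min(key=…); objective: alternative.

-- ===== PORT A =====
-- matrix cell read/write: Python's distance[i][j] / distance[i][j] = v; all indices the
-- Python executes are provably in range, so the getD defaults are never returned.
def mgetA (d : List (List Int)) (i j : Nat) : Int := (d.getD i []).getD j 0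
def msetA (d : List (List Int)) (i j : Nat) (v : Int) : List (List Int) :=
  d.set i ((d.getD i []).set j v)

-- literal port of calculate_levenshtein_distance (full DP matrix, three init/fill loops);
-- range(1, m+1) is List.range' 1 m (loop indices are nonnegative, so Nat counters are exact)
def calc_lev (phrase1 phrase2 : String) : Int :=
  let p := phrase1.toList
  let q := phrase2.toList
  let m := p.length
  let n := q.length
  let dist0 : List (List Int) := (List.range (m+1)).map (fun _ => List.replicate (n+1) (0:Int))
  let d1 := (List.range (m+1)).foldl (fun d i => msetA d i 0 (i:Int)) dist0
  let d2 := (List.range (n+1)).foldl (fun d j => msetA d 0 j (j:Int)) d1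
  let d3 := (List.range' 1 m).foldl (fun d i =>
      (List.range' 1 n).foldl (fun d j =>
        let cost : Int := if p.getD (i-1) ' ' = q.getD (j-1) ' ' then 0 else 1
        msetA d i j (min (min (mgetA d (i-1) j + 1) (mgetA d i (j-1) + 1))
                         (mgetA d (i-1) (j-1) + cost))) d) d2
  mgetA d3 m n

def find_nearest_subjects (list_of_subjects : List String) (source_subject : String) : Option String :=
  let scores := list_of_subjects.foldl
      (fun d sub => d.insert sub (calc_lev sub source_subject)) (PySem.Dict.empty)
  if scores.size = 0 then none
  else
    -- min(scores, key=scores.get); every key is present, so scores.get k = getD k 0 on keys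
    match PySem.List.min? scores.keys (fun k => scores.getD k 0) with
    | none => none  -- unreachable: scores is nonempty
    | some min_key => if (4:Int) ≤ scores.getD min_key 0 then some min_key else none

-- ===== PORT B =====
-- port of Source B's _edit: top-down memoized recursion on the index pair (i, j); the Python
-- dict cache is threaded through explicitly (each call returns its value and the cache)
def editB (p q : List Char) (i j : Nat) (cache : PySem.Dict (Nat × Nat) Int) :
    Int × PySem.Dict (Nat × Nat) Int :=
  match cache.get? (i, j) with
  | some v => (v, cache)
  | none =>
    let vc : Int × PySem.Dict (Nat × Nat) Int :=
      if _hi : i = 0 then ((j:Int), cache)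
      else if _hj : j = 0 then ((i:Int), cache)
      else
        let cost : Int := if p.getD (i-1) ' ' = q.getD (j-1) ' ' then 0 else 1
        let r1 := editB p q (i-1) j cache
        let r2 := editB p q i (j-1) r1.2
        let r3 := editB p q (i-1) (j-1) r2.2
        (min (min (r1.1 + 1) (r2.1 + 1)) (r3.1 + cost), r3.2)
    (vc.1, vc.2.insert (i, j) vc.1)   -- cache[key] = v
termination_by i + j
decreasing_by all_goals omega

-- port of Source B's _lev: fresh empty cache per pair of strings
def lev_alt (a b : String) : Int :=
  (editB a.toList b.toList a.toList.length b.toList.length PySem.Dict.empty).1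

def find_nearest_subjects_alt (list_of_subjects : List String) (source_subject : String) :
    Option String :=
  let best := list_of_subjects.foldl
      (fun (b : Option (Int × String)) sub =>
        match b with
        | none => some (lev_alt sub source_subject, sub)
        | some bd => if lev_alt sub source_subject < bd.1
                     then some (lev_alt sub source_subject, sub) else some bd) none
  match best with
  | none => none
  | some bd => if (4:Int) ≤ bd.1 then some bd.2 else none

-- ===== PRECONDITION & SPEC =====
def Spec_find_nearest_subjects (list_of_subjects : List String) (source_subject : String) (out : Option String) : Prop := out = find_nearest_subjects_alt list_of_subjects source_subject
instance (list_of_subjects : List String) (source_subject : String) (out : Option String) : Decidable (Spec_find_nearest_subjects list_of_subjects source_subject out) := by unfold Spec_find_nearest_subjects; infer_instance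

-- ===== CLAIM (what is proved, stated in full; the proofs are below) =====
def Claim_equal_find_nearest_subjects : Prop := ∀ (list_of_subjects : List String) (source_subject : String), Dom_find_nearest_subjects list_of_subjects source_subject → Spec_find_nearest_subjects list_of_subjects source_subject (find_nearest_subjects list_of_subjects source_subject)

-- ===== LEMMAS AND PROOFS =====

-- the common reference recurrence: E p q i j = edit distance of p.take i and q.take j
def E (p q : List Char) : Nat → Nat → Int
  | 0, j => (j : Int)
  | (i+1), 0 => ((i+1 : Nat) : Int)
  | (i+1), (j+1) =>
    min (min (E p q i (j+1) + 1) (E p q (i+1) j + 1))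
        (E p q i j + (if p.getD i ' ' = q.getD j ' ' then 0 else 1))

theorem E_zero_left (p q : List Char) (j : Nat) : E p q 0 j = (j : Int) := by cases j <;> simp [E]

theorem E_zero_right (p q : List Char) (i : Nat) : E p q i 0 = (i : Int) := by cases i <;> simp [E]

-- ---- matrix bookkeeping for port A ----
def ShapeM (m n : Nat) (d : List (List Int)) : Prop :=
  d.length = m+1 ∧ ∀ i, i < m+1 → (d.getD i []).length = n+1

theorem getD_set_outer (d : List (List Int)) (i i' : Nat) (r : List Int) :
    (d.set i r).getD i' [] = if i = i' ∧ i < d.length then r else d.getD i' [] := by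
  rcases eq_or_ne i i' with rfl | hne
  · by_cases hl : i < d.length
    · simp [List.getD_eq_getElem?_getD, hl]
    · have hnone : d[i]? = none := List.getElem?_eq_none (by omega)
      simp [List.getD_eq_getElem?_getD, hl]
  · simp [List.getD_eq_getElem?_getD, hne]

theorem shape_msetA {m n : Nat} {d : List (List Int)} (h : ShapeM m n d) (i j : Nat) (v : Int) :
    ShapeM m n (msetA d i j v) := by
  obtain ⟨h1, h2⟩ := h
  refine ⟨by simp [msetA, h1], fun i' hi' => ?_⟩
  rw [msetA, getD_set_outer]
  split_ifs with hc
  · obtain ⟨rfl, hlt⟩ := hc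
    rw [List.length_set]
    exact h2 _ (by omega)
  · exact h2 _ hi'

theorem mgetA_msetA_self {m n : Nat} {d : List (List Int)} (h : ShapeM m n d)
    {i j : Nat} (hi : i < m+1) (hj : j < n+1) (v : Int) :
    mgetA (msetA d i j v) i j = v := by
  obtain ⟨h1, h2⟩ := h
  rw [mgetA, msetA, getD_set_outer]
  rw [if_pos ⟨rfl, by omega⟩]
  have hlt : j < (d.getD i []).length := by rw [h2 _ hi]; omega
  simp only [List.getD_eq_getElem?_getD] at hlt ⊢
  simp [hlt]

theorem mgetA_msetA_ne {d : List (List Int)} {i j i' j' : Nat}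
    (hne : i' ≠ i ∨ j' ≠ j) (v : Int) :
    mgetA (msetA d i j v) i' j' = mgetA d i' j' := by
  rw [mgetA, msetA, getD_set_outer, mgetA]
  split_ifs with hc
  · obtain ⟨rfl, _⟩ := hc
    have hj : j' ≠ j := by tauto
    simp [List.getD_eq_getElem?_getD, Ne.symm hj]
  · rfl

theorem shape_dist0 (m n : Nat) :
    ShapeM m n ((List.range (m+1)).map (fun _ => List.replicate (n+1) (0:Int))) := by
  refine ⟨by simp, fun i hi => ?_⟩
  rw [List.getD_eq_getElem?_getD, List.getElem?_map]
  simp [hi]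

-- first init loop: distance[i][0] = i for i < k
theorem foldl_set_col0 (m n : Nat) (k : Nat) (hk : k ≤ m+1) :
    ∀ (d : List (List Int)), ShapeM m n d →
      ShapeM m n ((List.range k).foldl (fun d i => msetA d i 0 (i:Int)) d) ∧
      (∀ i j, mgetA ((List.range k).foldl (fun d i => msetA d i 0 (i:Int)) d) i j =
        if j = 0 ∧ i < k then (i:Int) else mgetA d i j) := by
  induction k with
  | zero => intro d hd; simpa using hd
  | succ k ih =>
    intro d hd
    rw [List.range_succ]
    simp only [List.foldl_append, List.foldl_cons, List.foldl_nil]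
    obtain ⟨hsh, hval⟩ := ih (by omega) d hd
    refine ⟨shape_msetA hsh _ _ _, fun i j => ?_⟩
    by_cases hik : i = k ∧ j = 0
    · obtain ⟨rfl, rfl⟩ := hik
      rw [mgetA_msetA_self hsh (by omega) (by omega)]
      simp
    · have hne : i ≠ k ∨ j ≠ 0 := by tauto
      rw [mgetA_msetA_ne (by tauto), hval]
      rcases hne with hne | hne
      · by_cases hj : j = 0 <;> simp [hj] <;> omega
      · simp [hne]

-- second init loop: distance[0][j] = j for j < k
theorem foldl_set_row0 (m n : Nat) (k : Nat) (hk : k ≤ n+1) :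
    ∀ (d : List (List Int)), ShapeM m n d →
      ShapeM m n ((List.range k).foldl (fun d j => msetA d 0 j (j:Int)) d) ∧
      (∀ i j, mgetA ((List.range k).foldl (fun d j => msetA d 0 j (j:Int)) d) i j =
        if i = 0 ∧ j < k then (j:Int) else mgetA d i j) := by
  induction k with
  | zero => intro d hd; simpa using hd
  | succ k ih =>
    intro d hd
    rw [List.range_succ]
    simp only [List.foldl_append, List.foldl_cons, List.foldl_nil]
    obtain ⟨hsh, hval⟩ := ih (by omega) d hd
    refine ⟨shape_msetA hsh _ _ _, fun i j => ?_⟩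
    by_cases hik : i = 0 ∧ j = k
    · obtain ⟨rfl, rfl⟩ := hik
      rw [mgetA_msetA_self hsh (by omega) (by omega)]
      simp
    · have hne : i ≠ 0 ∨ j ≠ k := by tauto
      rw [mgetA_msetA_ne (by tauto), hval]
      rcases hne with hne | hne
      · simp [hne]
      · by_cases hi : i = 0 <;> simp [hi] <;> omega

-- invariant after the outer fill loop has processed rows 1..i0
def InvI (p q : List Char) (i0 : Nat) (d : List (List Int)) : Prop :=
  ShapeM p.length q.length d ∧
  (∀ i j, i ≤ i0 → j ≤ q.length → mgetA d i j = E p q i j) ∧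
  (∀ i, i ≤ p.length → mgetA d i 0 = (i:Int))

-- invariant inside row i, cells 0..j0 done
def InvJ (p q : List Char) (i j0 : Nat) (d : List (List Int)) : Prop :=
  ShapeM p.length q.length d ∧
  (∀ i' j, i' < i → j ≤ q.length → mgetA d i' j = E p q i' j) ∧
  (∀ j, j ≤ j0 → mgetA d i j = E p q i j) ∧
  (∀ i', i' ≤ p.length → mgetA d i' 0 = (i':Int))

theorem inner_fill (p q : List Char) (i : Nat) (hi1 : 1 ≤ i) (him : i ≤ p.length) :
    ∀ (cnt j0 : Nat), j0 + cnt = q.length → ∀ d, InvJ p q i j0 d →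
      InvJ p q i q.length ((List.range' (j0+1) cnt).foldl (fun d j =>
        let cost : Int := if p.getD (i-1) ' ' = q.getD (j-1) ' ' then 0 else 1
        msetA d i j (min (min (mgetA d (i-1) j + 1) (mgetA d i (j-1) + 1))
                         (mgetA d (i-1) (j-1) + cost))) d) := by
  intro cnt
  induction cnt with
  | zero =>
    intro j0 hj0 d hd
    have : j0 = q.length := by omega
    subst this
    simpa using hd
  | succ cnt ih =>
    intro j0 hj0 d hd
    rw [List.range'_succ]
    simp only [List.foldl_cons]
    apply ih (j0+1) (by omega)
    obtain ⟨hsh, hrows, hrow, hcol⟩ := hd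
    -- the written value is E p q i (j0+1)
    have hv1 : mgetA d (i-1) (j0+1) = E p q (i-1) (j0+1) := hrows _ _ (by omega) (by omega)
    have hv2 : mgetA d i ((j0+1)-1) = E p q i j0 := by
      simpa using hrow j0 (le_refl _)
    have hv3 : mgetA d (i-1) ((j0+1)-1) = E p q (i-1) j0 := by
      simpa using hrows (i-1) j0 (by omega) (by omega)
    have hE : (min (min (mgetA d (i-1) (j0+1) + 1) (mgetA d i ((j0+1)-1) + 1))
        (mgetA d (i-1) ((j0+1)-1) + (if p.getD (i-1) ' ' = q.getD ((j0+1)-1) ' ' then 0 else 1)))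
        = E p q i (j0+1) := by
      obtain ⟨i', rfl⟩ : ∃ i', i = i' + 1 := ⟨i - 1, by omega⟩
      rw [hv1, hv2, hv3]
      simp only [Nat.add_sub_cancel]
      rw [E]
    refine ⟨shape_msetA hsh _ _ _, ?_, ?_, ?_⟩
    · intro i' j hi' hj
      rw [mgetA_msetA_ne (Or.inl (by omega))]
      exact hrows _ _ hi' hj
    · intro j hj
      by_cases hjj : j = j0 + 1
      · subst hjj
        rw [show (msetA d i (j0+1) _) = msetA d i (j0+1) (E p q i (j0+1)) by rw [← hE]]
        exact mgetA_msetA_self hsh (by omega) (by omega) _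
      · rw [mgetA_msetA_ne (Or.inr hjj)]
        exact hrow _ (by omega)
    · intro i' hi'
      rw [mgetA_msetA_ne (Or.inr (by omega))]
      exact hcol _ hi'

theorem outer_fill (p q : List Char) :
    ∀ (cnt i0 : Nat), i0 + cnt = p.length → ∀ d, InvI p q i0 d →
      InvI p q p.length ((List.range' (i0+1) cnt).foldl (fun d i =>
        (List.range' 1 q.length).foldl (fun d j =>
          let cost : Int := if p.getD (i-1) ' ' = q.getD (j-1) ' ' then 0 else 1
          msetA d i j (min (min (mgetA d (i-1) j + 1) (mgetA d i (j-1) + 1))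
                           (mgetA d (i-1) (j-1) + cost))) d) d) := by
  intro cnt
  induction cnt with
  | zero =>
    intro i0 hi0 d hd
    have : i0 = p.length := by omega
    subst this
    simpa using hd
  | succ cnt ih =>
    intro i0 hi0 d hd
    rw [List.range'_succ]
    simp only [List.foldl_cons]
    apply ih (i0+1) (by omega)
    obtain ⟨hsh, hdone, hcol⟩ := hd
    have hJ : InvJ p q (i0+1) 0 d := by
      refine ⟨hsh, fun i' j hi' hj => hdone _ _ (by omega) hj, fun j hj => ?_, hcol⟩
      have : j = 0 := by omega
      subst this
      rw [hcol _ (by omega), E_zero_right]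
    have := inner_fill p q (i0+1) (by omega) (by omega) q.length 0 (by omega) d hJ
    obtain ⟨hsh', hrows', hrow', hcol'⟩ := this
    refine ⟨hsh', fun i j hi hj => ?_, hcol'⟩
    rcases Nat.lt_or_ge i (i0+1) with h | h
    · exact hrows' _ _ h hj
    · have : i = i0 + 1 := by omega
      subst this
      exact hrow' _ hj

-- A's matrix DP computes E
theorem calc_lev_eq_E (s t : String) :
    calc_lev s t = E s.toList t.toList s.toList.length t.toList.length := by
  have h0 := shape_dist0 s.toList.length t.toList.length
  have h1 := foldl_set_col0 s.toList.length t.toList.length (s.toList.length+1) le_rfl _ h0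
  have h2 := foldl_set_row0 s.toList.length t.toList.length (t.toList.length+1) le_rfl _ h1.1
  have hbase : InvI s.toList t.toList 0
      ((List.range (t.toList.length+1)).foldl (fun d j => msetA d 0 j (j:Int))
        ((List.range (s.toList.length+1)).foldl (fun d i => msetA d i 0 (i:Int))
          ((List.range (s.toList.length+1)).map (fun _ => List.replicate (t.toList.length+1) (0:Int))))) := by
    refine ⟨h2.1, ?_, ?_⟩
    · intro i j hi hj
      have hi0 : i = 0 := by omega
      subst hi0
      rw [h2.2, if_pos ⟨rfl, by omega⟩, E_zero_left]
    · intro i hi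
      by_cases hiz : i = 0
      · subst hiz
        rw [h2.2, if_pos ⟨rfl, by omega⟩]
      · rw [h2.2, if_neg (by tauto), h1.2, if_pos ⟨rfl, by omega⟩]
  have h3 := outer_fill s.toList t.toList s.toList.length 0 (by omega) _ hbase
  exact h3.2.1 _ _ le_rfl le_rfl

-- ---- B's memoized recursion computes E ----
-- cache invariant: every memoized entry is the true subproblem value
def Cinv (p q : List Char) (cache : PySem.Dict (Nat × Nat) Int) : Prop :=
  ∀ k v, cache.get? k = some v → v = E p q k.1 k.2

theorem editB_correct (p q : List Char) :
    ∀ (n i j : Nat) (cache : PySem.Dict (Nat × Nat) Int), i + j ≤ n → Cinv p q cache →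
      (editB p q i j cache).1 = E p q i j ∧ Cinv p q (editB p q i j cache).2 := by
  intro n
  induction n with
  | zero =>
    intro i j cache hle hinv
    have hi : i = 0 := by omega
    subst hi
    rw [editB]
    cases hc : cache.get? (0, j) with
    | some v => exact ⟨hinv _ _ hc, hinv⟩
    | none =>
      simp only [dif_pos rfl]
      refine ⟨by simp [E_zero_left], ?_⟩
      intro k v hk
      rw [PySem.Dict.get?_insert] at hk
      split_ifs at hk with hkk
      · subst hkk
        simp [E_zero_left] at hk ⊢
        omega
      · exact hinv _ _ hk
  | succ n ih =>
    intro i j cache hle hinv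
    rw [editB]
    cases hc : cache.get? (i, j) with
    | some v => exact ⟨hinv _ _ hc, hinv⟩
    | none =>
      -- the computed value vc.1 equals E p q i j and the cache stays valid
      by_cases hi : i = 0
      · subst hi
        simp only [dif_pos rfl]
        refine ⟨by simp [E_zero_left], ?_⟩
        intro k v hk
        rw [PySem.Dict.get?_insert] at hk
        split_ifs at hk with hkk
        · subst hkk; simp [E_zero_left] at hk ⊢; omega
        · exact hinv _ _ hk
      · by_cases hj : j = 0
        · subst hj
          simp only [dif_neg hi]
          refine ⟨by simp [E_zero_right], ?_⟩
          intro k v hk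
          rw [PySem.Dict.get?_insert] at hk
          split_ifs at hk with hkk
          · subst hkk; simp [E_zero_right] at hk ⊢; omega
          · exact hinv _ _ hk
        · simp only [dif_neg hi, dif_neg hj]
          obtain ⟨h1v, h1c⟩ := ih (i-1) j cache (by omega) hinv
          obtain ⟨h2v, h2c⟩ := ih i (j-1) (editB p q (i-1) j cache).2 (by omega) h1c
          obtain ⟨h3v, h3c⟩ := ih (i-1) (j-1) (editB p q i (j-1) (editB p q (i-1) j cache).2).2
              (by omega) h2c
          have hval : (min (min ((editB p q (i-1) j cache).1 + 1)
                ((editB p q i (j-1) (editB p q (i-1) j cache).2).1 + 1))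
                ((editB p q (i-1) (j-1) (editB p q i (j-1) (editB p q (i-1) j cache).2).2).1
                  + (if p.getD (i-1) ' ' = q.getD (j-1) ' ' then 0 else 1))) = E p q i j := by
            rw [h1v, h2v, h3v]
            obtain ⟨i', rfl⟩ : ∃ i', i = i' + 1 := ⟨i - 1, by omega⟩
            obtain ⟨j', rfl⟩ : ∃ j', j = j' + 1 := ⟨j - 1, by omega⟩
            simp only [Nat.add_sub_cancel]
            rw [E]
          refine ⟨hval, ?_⟩
          intro k v hk
          rw [PySem.Dict.get?_insert] at hk
          by_cases hkk : k = (i, j)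
          · rw [if_pos hkk] at hk
            subst hkk
            exact (Option.some.inj hk) ▸ hval
          · rw [if_neg hkk] at hk
            exact h3c _ _ hk

theorem lev_alt_eq_E (s t : String) :
    lev_alt s t = E s.toList t.toList s.toList.length t.toList.length := by
  have h := editB_correct s.toList t.toList (s.toList.length + t.toList.length)
      s.toList.length t.toList.length PySem.Dict.empty le_rfl
      (by intro k v hk; simp [PySem.Dict.get?_empty] at hk)
  exact h.1

theorem lev_eq (s t : String) : calc_lev s t = lev_alt s t := by
  rw [calc_lev_eq_E, lev_alt_eq_E]

-- ---- selecting the minimum: dict + min(key=…) vs running best ----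

theorem min?_cons (f : String → Int) (x : String) (t : List String) :
    PySem.List.min? (x :: t) f = some (t.foldl (fun b y => if f y < f b then y else b) x) := by
  simp only [PySem.List.min?, List.foldl_cons]
  induction t generalizing x with
  | nil => rfl
  | cons y t ih =>
    simp only [List.foldl_cons]
    by_cases h : f y < f x
    · simpa [h] using ih y
    · simpa [h] using ih x

-- min over a Python set built by adds = the strict-< running minimum over the raw list
theorem min?_foldl_add (f : String → Int) : ∀ (t s : List String) (x : String),
    PySem.List.min? s f = some x →
    PySem.List.min? (t.foldl PySem.Set.add s) f
      = some (t.foldl (fun b y => if f y < f b then y else b) x) := by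
  intro t
  induction t with
  | nil => intro s x h; simpa using h
  | cons y t ih =>
    intro s x h
    simp only [List.foldl_cons]
    by_cases hy : y ∈ s
    · rw [PySem.Set.add_of_mem hy]
      have hle : f x ≤ f y := PySem.List.min?_isMin h y hy
      rw [show (if f y < f x then y else x) = x from if_neg (not_lt.mpr hle)]
      exact ih s x h
    · rw [PySem.Set.add_of_not_mem hy]
      cases s with
      | nil => simp [PySem.List.min?] at h
      | cons z s' =>
        rw [min?_cons] at h
        have hx := Option.some.inj h
        have hmin : PySem.List.min? ((z :: s') ++ [y]) f
            = some (if f y < f x then y else x) := by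
          rw [List.cons_append, min?_cons, List.foldl_append]
          simp [hx]
        exact ih _ _ hmin

-- every key of the scores dict carries its own Levenshtein score
theorem getD_insert_fold (src : String) : ∀ (l : List String) (d : PySem.Dict String Int) (k : String),
    (l.foldl (fun d sub => d.insert sub (calc_lev sub src)) d).getD k 0
      = if k ∈ l then calc_lev k src else d.getD k 0 := by
  intro l
  induction l with
  | nil => intro d k; simp
  | cons x t ih =>
    intro d k
    simp only [List.foldl_cons]
    rw [ih]
    by_cases hkt : k ∈ t
    · simp [hkt]
    · rw [PySem.Dict.getD_insert]
      by_cases hkx : k = x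
      · simp [hkt, hkx]
      · simp [hkt, hkx]

-- the running minimum only looks at key values of elements it visits
theorem foldl_min_congr (k1 k2 : String → Int) : ∀ (l : List String) (x : String) (S : List String),
    (∀ y ∈ S, k1 y = k2 y) → x ∈ S → (∀ y ∈ l, y ∈ S) →
    l.foldl (fun b y => if k1 y < k1 b then y else b) x
      = l.foldl (fun b y => if k2 y < k2 b then y else b) x := by
  intro l
  induction l with
  | nil => intro x S _ _ _; rfl
  | cons y l ih =>
    intro x S hS hx hl
    simp only [List.foldl_cons]
    have hy : y ∈ S := hl y (by simp)
    rw [hS y hy, hS x hx]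
    by_cases h : k2 y < k2 x
    · simp only [if_pos h]
      exact ih y S hS hy (fun z hz => hl z (by simp [hz]))
    · simp only [if_neg h]
      exact ih x S hS hx (fun z hz => hl z (by simp [hz]))

-- B's option-pair running best = the element-level running minimum
theorem foldl_best_pair (src : String) : ∀ (t : List String) (b : Int × String),
    t.foldl (fun (acc : Option (Int × String)) sub =>
        match acc with
        | none => some (lev_alt sub src, sub)
        | some bd => if lev_alt sub src < bd.1 then some (lev_alt sub src, sub) else some bd)
      (some b)
    = some (t.foldl (fun (c : Int × String) y =>
        if lev_alt y src < c.1 then (lev_alt y src, y) else c) b) := by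
  intro t
  induction t with
  | nil => intro b; rfl
  | cons y t ih =>
    intro b
    simp only [List.foldl_cons]
    by_cases h : lev_alt y src < b.1 <;> simp [h, ih]

theorem foldl_pair_elem (src : String) : ∀ (t : List String) (x : String),
    t.foldl (fun (c : Int × String) y =>
        if lev_alt y src < c.1 then (lev_alt y src, y) else c) (lev_alt x src, x)
    = (lev_alt (t.foldl (fun b y => if lev_alt y src < lev_alt b src then y else b) x) src,
       t.foldl (fun b y => if lev_alt y src < lev_alt b src then y else b) x) := by
  intro t
  induction t with
  | nil => intro x; rfl
  | cons y t ih =>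
    intro x
    simp only [List.foldl_cons]
    by_cases h : lev_alt y src < lev_alt x src <;> simp [h, ih]

-- ===== VERDICT (by name: the statement is the Claim_ definition above) =====
theorem find_nearest_subjects_spec : Claim_equal_find_nearest_subjects := by
  intro l src _
  show find_nearest_subjects l src = find_nearest_subjects_alt l src
  cases l with
  | nil => rfl
  | cons x t =>
    have hAdef : find_nearest_subjects (x::t) src =
        (if ((x::t).foldl (fun d sub => d.insert sub (calc_lev sub src)) PySem.Dict.empty).size = 0 then none
         else match PySem.List.min? ((x::t).foldl (fun d sub => d.insert sub (calc_lev sub src)) PySem.Dict.empty).keys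
                (fun k => ((x::t).foldl (fun d sub => d.insert sub (calc_lev sub src)) PySem.Dict.empty).getD k 0) with
              | none => none
              | some min_key =>
                if (4:Int) ≤ ((x::t).foldl (fun d sub => d.insert sub (calc_lev sub src)) PySem.Dict.empty).getD min_key 0
                then some min_key else none) := rfl
    have hBdef : find_nearest_subjects_alt (x::t) src =
        (match (x::t).foldl (fun (acc : Option (Int × String)) sub =>
            match acc with
            | none => some (lev_alt sub src, sub)
            | some bd => if lev_alt sub src < bd.1 then some (lev_alt sub src, sub) else some bd) none with
         | none => none
         | some bd => if (4:Int) ≤ bd.1 then some bd.2 else none) := rfl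
    rw [hAdef, hBdef]
    set scores := (x::t).foldl (fun d sub => d.insert sub (calc_lev sub src)) PySem.Dict.empty with hscores
    have hkeys : scores.keys = PySem.Set.ofList (x::t) := by
      rw [hscores, PySem.Dict.keys_foldl_insert (x::t) (fun _ sub => calc_lev sub src) PySem.Dict.empty]
      rfl
    have hgetD : ∀ k, k ∈ (x::t) → scores.getD k 0 = calc_lev k src := by
      intro k hk
      rw [hscores, getD_insert_fold]
      simp [hk]
    have hofList : PySem.Set.ofList (x::t) = t.foldl PySem.Set.add [x] := rfl
    have hx_min : PySem.List.min? [x] (fun k => scores.getD k 0) = some x := rfl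
    have hmin := min?_foldl_add (fun k => scores.getD k 0) t [x] x hx_min
    have hmk : t.foldl (fun b y => if scores.getD y 0 < scores.getD b 0 then y else b) x
        = t.foldl (fun b y => if lev_alt y src < lev_alt b src then y else b) x :=
      foldl_min_congr (fun k => scores.getD k 0) (fun k => lev_alt k src) t x (x::t)
        (fun y hy => by show scores.getD y 0 = lev_alt y src; rw [hgetD y hy, lev_eq])
        (by simp) (fun y hy => by simp [hy])
    have hmem : t.foldl (fun b y => if lev_alt y src < lev_alt b src then y else b) x ∈ (x::t) := by
      have h1 : PySem.List.min? (t.foldl PySem.Set.add [x]) (fun k => scores.getD k 0)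
          = some (t.foldl (fun b y => if lev_alt y src < lev_alt b src then y else b) x) := by
        rw [hmin, hmk]
      have h2 := PySem.List.min?_mem h1
      rw [← hofList, PySem.Set.mem_ofList] at h2
      exact h2
    have hsz : ¬ scores.size = 0 := by
      intro h0
      have hlen : scores.keys.length = 0 := by
        simp only [PySem.Dict.keys, PySem.Dict.size] at *
        simpa using h0
      rw [List.length_eq_zero_iff] at hlen
      have hxmem : x ∈ PySem.Set.ofList (x::t) := (PySem.Set.mem_ofList _ _).mpr (by simp)
      rw [← hkeys, hlen] at hxmem
      simp at hxmem
    have hB1 : (x::t).foldl (fun (acc : Option (Int × String)) sub =>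
        match acc with
        | none => some (lev_alt sub src, sub)
        | some bd => if lev_alt sub src < bd.1 then some (lev_alt sub src, sub) else some bd) none
        = t.foldl (fun (acc : Option (Int × String)) sub =>
        match acc with
        | none => some (lev_alt sub src, sub)
        | some bd => if lev_alt sub src < bd.1 then some (lev_alt sub src, sub) else some bd)
          (some (lev_alt x src, x)) := rfl
    rw [if_neg hsz, hkeys, hofList, hmin, hmk, hB1, foldl_best_pair, foldl_pair_elem]
    set mk := t.foldl (fun b y => if lev_alt y src < lev_alt b src then y else b) x with hmkdef
    show (if (4:Int) ≤ scores.getD mk 0 then some mk else none)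
        = (if (4:Int) ≤ lev_alt mk src then some mk else none)
    rw [hgetD mk hmem, lev_eq]
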